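-- pv_equiv track=rewrite | github.com/gu-benites/rotina-api | utils/utils.py | md_to_whatsapp_md
-- ===== SOURCE A (Python) =====
-- def md_to_whatsapp_md(text):
--     """
--     Converts standard Markdown text to WhatsApp Markdown format.
--     :param text: str - The Markdown text to convert.
--     :return: str - The text converted to WhatsApp Markdown format.
--     """
--     # Convert bold (Standard Markdown can use ** or __)
--     text = text.replace('**', '*').replace('__', '*')
--     # Wrap lines starting with ### or #### in asterisks for bold in WhatsApp
--     lines = text.split('\n')
--     for i, line in enumerate(lines):
--         if line.startswith('###') or line.startswith('####'):
--             lines[i] = '*' + line.strip('# ').strip() + '*'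
--     converted_text = '\n'.join(lines)
--     return converted_text
-- ===== SOURCE B (Python) =====
-- def md_to_whatsapp_md(text):
--     """
--     Converts standard Markdown text to WhatsApp Markdown format.
--     Single fused pass per line: both bold replacements are collapsed in one
--     character scan, and header lines are wrapped as they are produced.
--     """
--     return '\n'.join(_convert_line(line) for line in text.split('\n'))
--
--
-- def _convert_line(line):
--     s = _collapse(line)
--     if s.startswith('###'):
--         return '*' + s.strip('# ').strip() + '*'
--     return s
--
--
-- def _collapse(line):
--     # one left-to-right scan replacing the pairs '**' and '__' by '*'
--     out = []
--     i, n = 0, len(line)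
--     while i < n:
--         c = line[i]
--         if (c == '*' or c == '_') and i + 1 < n and line[i + 1] == c:
--             out.append('*')
--             i += 2
--         else:
--             out.append(c)
--             i += 1
--     return ''.join(out)
-- ===== Notes on version B (the rewrite author's own statement) =====
-- stated objective: alternative
-- what changed: Instead of two whole-text replace passes followed by split and an index-mutating loop, B splits first and makes a single fused character scan per line that collapses both double-character bold markers in one pass and wraps header lines as they are produced.
import Mathlib
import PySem

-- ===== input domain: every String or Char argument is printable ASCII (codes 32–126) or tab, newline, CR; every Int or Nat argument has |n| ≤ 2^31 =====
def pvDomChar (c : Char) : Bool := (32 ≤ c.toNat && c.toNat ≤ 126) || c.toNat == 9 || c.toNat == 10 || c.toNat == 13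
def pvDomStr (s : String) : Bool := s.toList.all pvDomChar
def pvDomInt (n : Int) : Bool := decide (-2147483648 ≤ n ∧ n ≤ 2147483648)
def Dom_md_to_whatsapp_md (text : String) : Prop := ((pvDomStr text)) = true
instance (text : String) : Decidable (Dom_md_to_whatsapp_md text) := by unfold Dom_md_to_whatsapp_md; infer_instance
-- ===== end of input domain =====

-- B replaces A's two whole-text replace passes + split + index-mutating loop by a single fused
-- per-line character scan (alternative structure, same cost).

-- ===== PORT A =====
-- A: text.replace('**','*').replace('__','*'); split('\n'); the enumerate loop overwrites each
-- index once, independently, so it is ported as a map over the lines; '\n'.join.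
def md_to_whatsapp_md (text : String) : String :=
  let t1 := PySem.Str.replace text "**" "*"
  let t2 := PySem.Str.replace t1 "__" "*"
  -- text.split('\n'): the separator is nonempty, so split is total (Chars.splitOn is the sep ≠ "" form)
  let lines := (PySem.Chars.splitOn t2.toList "\n".toList).map String.ofList
  let lines2 := lines.map (fun line =>
    if PySem.Str.startswith line "###" || PySem.Str.startswith line "####" then
      "*" ++ PySem.Str.strip (PySem.Str.stripChars line "# ") ++ "*"
    else line)
  PySem.Str.join "\n" lines2

-- ===== PORT B =====
-- Source B's _collapse: one left-to-right scan replacing the pairs '**' and '__' by '*'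
def pvCollapse : List Char → List Char
  | [] => []
  | [c] => [c]
  | c :: d :: t =>
    if (c = '*' ∨ c = '_') ∧ d = c then '*' :: pvCollapse t
    else c :: pvCollapse (d :: t)

-- Source B's _convert_line
def pvConvertLine (line : String) : String :=
  let s := String.ofList (pvCollapse line.toList)
  if PySem.Str.startswith s "###" then
    "*" ++ PySem.Str.strip (PySem.Str.stripChars s "# ") ++ "*"
  else s

def md_to_whatsapp_md_alt (text : String) : String :=
  PySem.Str.join "\n"
    (((PySem.Chars.splitOn text.toList "\n".toList).map String.ofList).map pvConvertLine)

-- ===== PRECONDITION & SPEC =====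
def Spec_md_to_whatsapp_md (text : String) (out : String) : Prop := out = md_to_whatsapp_md_alt text
instance (text : String) (out : String) : Decidable (Spec_md_to_whatsapp_md text out) := by unfold Spec_md_to_whatsapp_md; infer_instance

-- ===== CLAIM (what is proved, stated in full; the proofs are below) =====
def Claim_equal_md_to_whatsapp_md : Prop := ∀ (text : String), Dom_md_to_whatsapp_md text → Spec_md_to_whatsapp_md text (md_to_whatsapp_md text)

-- ===== LEMMAS AND PROOFS =====

-- structural model of s.split('\n')
def pvSplitNl : List Char → List (List Char)
  | [] => [[]]
  | c :: t =>
    if c = '\n' then [] :: pvSplitNl t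
    else match pvSplitNl t with
      | [] => [[c]]
      | h :: r => (c :: h) :: r

-- structural model of s.replace(aa, '*') for a two-character pattern [a,a]
def pvRep (a : Char) : List Char → List Char
  | [] => []
  | [c] => [c]
  | c :: d :: t =>
    if c = a ∧ d = a then '*' :: pvRep a t
    else c :: pvRep a (d :: t)

lemma pvSplitNl_ne_nil (s : List Char) : pvSplitNl s ≠ [] := by
  cases s with
  | nil => simp [pvSplitNl]
  | cons c t =>
    simp only [pvSplitNl]
    split
    · simp
    · cases h : pvSplitNl t <;> simp

lemma pvSplitNl_exists (t : List Char) : ∃ h r, pvSplitNl t = h :: r := by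
  cases hx : pvSplitNl t with
  | nil => exact absurd hx (pvSplitNl_ne_nil t)
  | cons x y => exact ⟨x, y, rfl⟩

lemma splitOn_go_nl : ∀ (fuel : Nat) (l cur : List Char) (accs : List (List Char)),
    l.length < fuel →
    PySem.Chars.splitOn.go ['\n'] fuel l cur accs =
      accs.reverse ++ (match pvSplitNl l with
        | [] => [cur.reverse]
        | h :: r => (cur.reverse ++ h) :: r) := by
  intro fuel
  induction fuel with
  | zero => intro l cur accs h; omega
  | succ f ih =>
    intro l cur accs h
    cases l with
    | nil =>
      rw [PySem.Chars.splitOn.go.eq_def]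
      simp [pvSplitNl]
    | cons c t =>
      rw [PySem.Chars.splitOn.go.eq_def]
      simp only [List.isPrefixOf, List.length_cons] at *
      by_cases hc : c = '\n'
      · subst hc
        simp only [beq_self_eq_true, Bool.and_eq_true]
        rw [if_pos (by simp)]
        simp only [List.length_nil, List.drop_succ_cons, List.drop_zero]
        rw [ih t [] (cur.reverse :: accs) (by omega)]
        simp only [pvSplitNl]
        cases h2 : pvSplitNl t with
        | nil => exact absurd h2 (pvSplitNl_ne_nil t)
        | cons hh r => simp
      · rw [if_neg (by simp; exact fun h' => hc h'.symm)]
        rw [ih t (c :: cur) accs (by omega)]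
        simp only [pvSplitNl, if_neg hc]
        cases h2 : pvSplitNl t with
        | nil => exact absurd h2 (pvSplitNl_ne_nil t)
        | cons hh r => simp

lemma splitOn_nl (s : List Char) : PySem.Chars.splitOn s ['\n'] = pvSplitNl s := by
  unfold PySem.Chars.splitOn
  rw [splitOn_go_nl (s.length + 1) s [] [] (by omega)]
  cases h2 : pvSplitNl s with
  | nil => exact absurd h2 (pvSplitNl_ne_nil s)
  | cons hh r => simp

lemma replace_go_pair (a : Char) : ∀ (fuel : Nat) (l acc : List Char),
    l.length ≤ fuel →
    PySem.Chars.replace.go [a, a] ['*'] fuel l acc = acc.reverse ++ pvRep a l := by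
  intro fuel
  induction fuel with
  | zero =>
    intro l acc h
    have : l = [] := List.length_eq_zero_iff.mp (by omega)
    subst this; rw [PySem.Chars.replace.go.eq_1]; simp [pvRep]
  | succ f ih =>
    intro l acc h
    cases l with
    | nil =>
      rw [PySem.Chars.replace.go.eq_2 _ _ _ _ (by omega)]; simp [pvRep]
    | cons c t =>
      rw [PySem.Chars.replace.go.eq_3]
      simp only [List.length_cons] at h
      cases t with
      | nil =>
        rw [if_neg (by simp)]
        rw [ih [] (c :: acc) (by omega)]
        simp [pvRep]
      | cons d t' =>
        by_cases hp : c = a ∧ d = a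
        · obtain ⟨hc, hd⟩ := hp
          subst hc; subst hd
          rw [if_pos (by simp)]
          simp only [List.length_cons, List.length_nil, List.drop_succ_cons, List.drop_zero,
            List.reverse_cons, List.reverse_nil, List.nil_append, List.singleton_append]
          rw [ih t' ('*' :: acc) (by simp only [List.length_cons] at h; omega)]
          simp [pvRep]
        · rw [if_neg (by
            simp only [List.isPrefixOf, Bool.and_eq_true, beq_iff_eq]
            rintro ⟨h1, h2, -⟩; exact hp ⟨h1.symm, h2.symm⟩)]
          rw [ih (d :: t') (c :: acc) (by simp only [List.length_cons] at h ⊢; omega)]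
          simp [pvRep, hp]

lemma replace_pair (a : Char) (s : List Char) :
    PySem.Chars.replace s [a, a] ['*'] = pvRep a s := by
  unfold PySem.Chars.replace
  rw [if_neg (by simp)]
  rw [replace_go_pair a s.length s [] (by omega)]
  simp

lemma pvRep_cons_ne {a c : Char} (h : c ≠ a) (t : List Char) :
    pvRep a (c :: t) = c :: pvRep a t := by
  cases t <;> simp [pvRep, h]

lemma pvRep_head (a c : Char) (t : List Char) :
    ∃ r, pvRep a (c :: t) = c :: r ∨ pvRep a (c :: t) = '*' :: r := by
  cases t with
  | nil => exact ⟨[], Or.inl rfl⟩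
  | cons d t' =>
    by_cases hp : c = a ∧ d = a
    · exact ⟨pvRep a t', Or.inr (by simp [pvRep, hp])⟩
    · exact ⟨pvRep a (d :: t'), Or.inl (by simp [pvRep, hp])⟩

-- the fused scan equals the two sequential replace passes
lemma pvCollapse_eq (s : List Char) :
    pvCollapse s = pvRep '_' (pvRep '*' s) := by
  fun_induction pvCollapse s with
  | case1 => rfl
  | case2 c => rfl
  | case3 c d t hcond ih =>
    obtain ⟨hcd, hd⟩ := hcond
    subst hd
    rcases hcd with hc | hc <;> subst hc
    · have h1 : pvRep '*' ('*' :: '*' :: t) = '*' :: pvRep '*' t := by simp [pvRep]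
      rw [h1, pvRep_cons_ne (by decide), ih]
    · have h1 : pvRep '*' ('_' :: '_' :: t) = '_' :: pvRep '*' ('_' :: t) := by
        cases t <;> simp [pvRep]
      have h2 : pvRep '*' ('_' :: t) = '_' :: pvRep '*' t := by
        cases t with
        | nil => rfl
        | cons x y => exact pvRep_cons_ne (by decide) _
      rw [h1, h2]
      have h3 : pvRep '_' ('_' :: '_' :: pvRep '*' t) = '*' :: pvRep '_' (pvRep '*' t) := by
        simp [pvRep]
      rw [h3, ih]
  | case4 c d t hcond ih =>
    have h1 : pvRep '*' (c :: d :: t) = c :: pvRep '*' (d :: t) := by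
      simp only [pvRep]
      rw [if_neg]
      rintro ⟨hc, hd⟩; exact hcond ⟨Or.inl hc, by rw [hd, hc]⟩
    rw [h1]
    obtain ⟨r, hr⟩ := pvRep_head '*' d t
    have h2 : pvRep '_' (c :: pvRep '*' (d :: t)) = c :: pvRep '_' (pvRep '*' (d :: t)) := by
      by_cases hc : c = '_'
      · subst hc
        have hd : d ≠ '_' := fun hd => hcond ⟨Or.inr rfl, hd⟩
        rcases hr with hr | hr <;> rw [hr]
        · simp [pvRep, hd]
        · simp [pvRep]
      · exact pvRep_cons_ne hc _
    rw [h2, ih]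

lemma pvSplitNl_cons_ne {c : Char} (hc : c ≠ '\n') (t : List Char) :
    ∀ h r, pvSplitNl t = h :: r → pvSplitNl (c :: t) = (c :: h) :: r := by
  intro h r hhr
  simp only [pvSplitNl, if_neg hc, hhr]

-- a single-pattern replace commutes with splitting on '\n'
lemma splitNl_pvRep (a : Char) (ha : a ≠ '\n') : ∀ (s : List Char),
    pvSplitNl (pvRep a s) = (pvSplitNl s).map (pvRep a) := by
  intro s
  fun_induction pvRep a s with
  | case1 => simp [pvSplitNl, pvRep]
  | case2 c =>
    by_cases hc : c = '\n'
    · subst hc; simp [pvRep, pvSplitNl]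
    · simp [pvRep, pvSplitNl, hc]
  | case3 c d t hcond ih =>
    obtain ⟨hc, hd⟩ := hcond
    rw [hc, hd]
    obtain ⟨h, r, hhr⟩ := pvSplitNl_exists t
    have lhsX : pvSplitNl (pvRep a t) = pvRep a h :: (r.map (pvRep a)) := by
      rw [ih, hhr]; rfl
    have l1 : pvSplitNl ('*' :: pvRep a t) = ('*' :: pvRep a h) :: r.map (pvRep a) :=
      pvSplitNl_cons_ne (by decide) _ _ _ lhsX
    have r1 : pvSplitNl (a :: a :: t) = (a :: a :: h) :: r :=
      pvSplitNl_cons_ne ha _ _ _ (pvSplitNl_cons_ne ha _ _ _ hhr)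
    rw [l1, r1]
    simp only [List.map_cons]
    congr 1
    simp [pvRep]
  | case4 c d t hcond ih =>
    by_cases hc : c = '\n'
    · subst hc
      have hl : ∀ x : List Char, pvSplitNl ('\n' :: x) = [] :: pvSplitNl x := by
        intro x; simp [pvSplitNl]
      rw [hl, hl, ih]
      simp [pvRep]
    · obtain ⟨h, r, hhr⟩ := pvSplitNl_exists (d :: t)
      have hkey : pvRep a (c :: h) = c :: pvRep a h := by
        by_cases hda : d = '\n'
        · subst hda
          have hnl : pvSplitNl ('\n' :: t) = [] :: pvSplitNl t := by
            simp [pvSplitNl]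
          rw [hnl] at hhr
          have : h = [] := (List.cons_eq_cons.mp hhr).1.symm
          rw [this]; rfl
        · obtain ⟨h2, r2, hhr2⟩ := pvSplitNl_exists t
          have : h = d :: h2 := by
            rw [pvSplitNl_cons_ne hda _ _ _ hhr2] at hhr
            exact (List.cons_eq_cons.mp hhr).1.symm
          rw [this]
          simp only [pvRep]
          rw [if_neg hcond]
      have lhsX : pvSplitNl (pvRep a (d :: t)) = pvRep a h :: r.map (pvRep a) := by
        rw [ih, hhr]; rfl
      rw [pvSplitNl_cons_ne hc _ _ _ lhsX,
        pvSplitNl_cons_ne hc _ _ _ hhr]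
      simp only [List.map_cons, hkey]

-- A's header test: a '####' line is in particular a '###' line, so the disjunction collapses
lemma pvOr_startswith (l : String) :
    (PySem.Str.startswith l "###" || PySem.Str.startswith l "####") = PySem.Str.startswith l "###" := by
  cases h : PySem.Str.startswith l "####"
  · simp
  · simp only [Bool.or_true]
    have h3 : PySem.Str.startswith l "###" = true := by
      rw [PySem.Str.startswith_eq] at h ⊢
      rw [PySem.Chars.startswith_iff] at h ⊢
      exact List.IsPrefix.trans (by decide) h
    rw [h3]

-- A's per-line transform of a replaced line equals B's fused per-line transform
lemma pvLine_key (cs : List Char) :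
    (if PySem.Str.startswith (String.ofList (pvRep '_' (pvRep '*' cs))) "###"
        || PySem.Str.startswith (String.ofList (pvRep '_' (pvRep '*' cs))) "####" then
      "*" ++ PySem.Str.strip (PySem.Str.stripChars (String.ofList (pvRep '_' (pvRep '*' cs))) "# ") ++ "*"
     else String.ofList (pvRep '_' (pvRep '*' cs)))
    = pvConvertLine (String.ofList cs) := by
  unfold pvConvertLine
  have h1 : pvCollapse ((String.ofList cs).toList) = pvRep '_' (pvRep '*' cs) := by
    rw [show (String.ofList cs).toList = cs by simp]
    exact pvCollapse_eq cs
  simp only [h1, pvOr_startswith]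

-- ===== VERDICT (by name: the statement is the Claim_ definition above) =====
theorem md_to_whatsapp_md_spec : Claim_equal_md_to_whatsapp_md := by
  intro text _
  show md_to_whatsapp_md text = md_to_whatsapp_md_alt text
  unfold md_to_whatsapp_md md_to_whatsapp_md_alt
  have ht2 : (PySem.Str.replace (PySem.Str.replace text "**" "*") "__" "*").toList
      = pvRep '_' (pvRep '*' text.toList) := by
    rw [PySem.Str.toList_replace, PySem.Str.toList_replace]
    rw [show ("**" : String).toList = ['*','*'] from rfl,
        show ("__" : String).toList = ['_','_'] from rfl,
        show ("*" : String).toList = ['*'] from rfl]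
    rw [replace_pair, replace_pair]
  have hnl : ("\n" : String).toList = ['\n'] := rfl
  have hsplitA : PySem.Chars.splitOn (pvRep '_' (pvRep '*' text.toList)) ['\n']
      = ((pvSplitNl text.toList).map (pvRep '*')).map (pvRep '_') := by
    rw [splitOn_nl, splitNl_pvRep '_' (by decide), splitNl_pvRep '*' (by decide)]
  simp only [ht2, hnl, hsplitA, splitOn_nl, List.map_map]
  refine congrArg _ ?_
  refine List.map_congr_left ?_
  intro cs _
  exact pvLine_key cs
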